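-- pv_equiv track=rewrite | github.com/Keamush/python_home_works | OneSoft/Home_work/Марат/hw5_recursion.py | enrich_dict
-- ===== SOURCE A (Python) =====
-- def enrich_dict(string_num: str, current_dict):
--     begining_of_string_num = string_num[0:len(string_num) - 1]
--     ending_of_string_num = string_num[-1]
--     if begining_of_string_num in current_dict.keys():
--         sum_of_this_string_num = current_dict[begining_of_string_num] + (int(ending_of_string_num) ** len(string_num))
--         current_dict[string_num] = sum_of_this_string_num
--         return current_dict
--     else:
--         return enrich_dict(begining_of_string_num, current_dict)
-- ===== SOURCE B (Python) =====
-- def enrich_dict(string_num: str, current_dict):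
--     # Find the longest proper prefix that is already a key, then set the one
--     # new entry; mutates current_dict in place like the original.
--     k = next(k for k in range(len(string_num) - 1, -1, -1) if string_num[:k] in current_dict)
--     current_dict[string_num[:k + 1]] = current_dict[string_num[:k]] + int(string_num[k]) ** (k + 1)
--     return current_dict
-- ===== Notes on version B (the rewrite author's own statement) =====
-- stated objective: simpler
-- what changed: Replaces the tail recursion on an ever-shrinking string by two phases: a next()-search for the largest prefix length k whose prefix is a key, then a single dictionary update, with no recursion and no string reassignment.
import Mathlib
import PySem

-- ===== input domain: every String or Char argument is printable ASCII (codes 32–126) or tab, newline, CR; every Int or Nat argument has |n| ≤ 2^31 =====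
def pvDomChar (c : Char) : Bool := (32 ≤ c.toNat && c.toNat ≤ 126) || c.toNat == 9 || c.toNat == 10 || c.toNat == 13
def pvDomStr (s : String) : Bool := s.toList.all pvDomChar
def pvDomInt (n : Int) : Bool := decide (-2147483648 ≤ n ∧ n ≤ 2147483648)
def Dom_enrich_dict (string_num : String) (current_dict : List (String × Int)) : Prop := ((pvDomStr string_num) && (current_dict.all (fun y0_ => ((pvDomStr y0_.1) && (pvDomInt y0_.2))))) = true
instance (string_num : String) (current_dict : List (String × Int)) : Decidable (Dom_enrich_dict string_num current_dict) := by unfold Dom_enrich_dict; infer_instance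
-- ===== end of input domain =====

-- B replaces A's tail recursion on a shrinking string by one loop over prefix lengths (simpler);
-- both mutate the Python dict in place identically on admitted inputs; equivalence is about the returned dict.


-- ===== PORT A =====
-- s[0:len(s)-1] is PySem.List.slice L 0 (len-1); proved equal to dropLast (cited by the port's decreasing_by)
theorem pvSliceInit_eq_dropLast (L : List Char) :
    PySem.List.slice L (some 0) (some ((L.length : Int) - 1)) = L.dropLast := by
  cases L with
  | nil => rfl
  | cons a t =>
      have h : ((a :: t).length : Int) - 1 = ((t.length : Nat) : Int) := by
        push_cast [List.length_cons]; ring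
      rw [h, PySem.List.slice_zero_start, PySem.List.slice_to_natCast,
          List.dropLast_eq_take]
      simp

-- literal transliteration of A: recursion on the string, s[-1] via pyGet? (none = IndexError, junk d),
-- int(c) via ofStr? (none = ValueError, junk d); dict as PySem.Dict over the assoc list
def enrichDictRecA (L : List Char) (d : PySem.Dict String Int) : PySem.Dict String Int :=
  let begining := PySem.List.slice L (some 0) (some ((L.length : Int) - 1))
  match h : PySem.List.pyGet? L (-1) with
  | none => d
  | some c =>
      if PySem.Dict.contains d (String.ofList begining) then
        match PySem.Int.ofStr? (String.ofList [c]) with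
        | none => d
        | some e =>
            PySem.Dict.insert d (String.ofList L)
              (PySem.Dict.getD d (String.ofList begining) 0 + e ^ L.length)
      else enrichDictRecA begining d
termination_by L.length
decreasing_by
  have hne : L ≠ [] := by
    intro hnil; subst hnil
    rw [PySem.List.pyGet?_neg_one] at h
    simp at h
  have h2 := pvSliceInit_eq_dropLast L
  simp only [PySem.List.slice_zero_start] at h2 ⊢
  simp only [h2, List.length_dropLast]
  have h3 : 0 < L.length := List.length_pos_of_ne_nil hne
  omega

def enrich_dict (string_num : String) (current_dict : List (String × Int)) : List (String × Int) :=
  (enrichDictRecA string_num.toList (PySem.Dict.mk current_dict)).items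

-- ===== PORT B =====
-- literal transliteration of B: the next()-search over 'range(len-1, -1, -1)' is the fuel-indexed
-- scan pvFindPrefixK (none = StopIteration, junk d below); string_num[:k] / [:k+1] are List.take
-- (k nonnegative, in range), string_num[k] is getD k, int(.) is ofStr? (none = ValueError, junk d)
def pvFindPrefixK (L : List Char) (d : PySem.Dict String Int) : Nat → Option Nat
  | 0 => none
  | n + 1 => if PySem.Dict.contains d (String.ofList (L.take n)) then some n else pvFindPrefixK L d n

def enrich_dict_alt (string_num : String) (current_dict : List (String × Int)) : List (String × Int) :=
  match pvFindPrefixK string_num.toList (PySem.Dict.mk current_dict) string_num.toList.length with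
  | none => current_dict
  | some k =>
      match PySem.Int.ofStr? (String.ofList [string_num.toList.getD k ' ']) with
      | none => current_dict
      | some e =>
          (PySem.Dict.insert (PySem.Dict.mk current_dict) (String.ofList (string_num.toList.take (k + 1)))
            (PySem.Dict.getD (PySem.Dict.mk current_dict) (String.ofList (string_num.toList.take k)) 0 + e ^ (k + 1))).items

-- ===== PRECONDITION & SPEC =====
-- Pre_ excludes exactly the inputs where Python A raises: IndexError when no proper prefix
-- (down to '') is a key of the dict, and ValueError when the character after the longest
-- matching prefix is not a decimal digit.
def Pre_enrich_dict (string_num : String) (current_dict : List (String × Int)) : Prop :=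
  ∃ k < string_num.toList.length,
    PySem.Dict.contains (PySem.Dict.mk current_dict) (String.ofList (string_num.toList.take k)) = true ∧
    (∀ j < string_num.toList.length, k < j →
      PySem.Dict.contains (PySem.Dict.mk current_dict) (String.ofList (string_num.toList.take j)) = false) ∧
    PySem.Chars.isdigit (string_num.toList.getD k ' ') = true
instance (string_num : String) (current_dict : List (String × Int)) : Decidable (Pre_enrich_dict string_num current_dict) := by unfold Pre_enrich_dict; infer_instance

def pvWitness_enrich_dict : String × (List (String × Int)) := ("123", [("1", 5)])

def Spec_enrich_dict (string_num : String) (current_dict : List (String × Int)) (out : List (String × Int)) : Prop := out = enrich_dict_alt string_num current_dict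
instance (string_num : String) (current_dict : List (String × Int)) (out : List (String × Int)) : Decidable (Spec_enrich_dict string_num current_dict out) := by unfold Spec_enrich_dict; infer_instance

-- ===== CLAIM (what is proved, stated in full; the proofs are below) =====
def Claim_equal_enrich_dict : Prop := ∀ (string_num : String) (current_dict : List (String × Int)), Dom_enrich_dict string_num current_dict → Pre_enrich_dict string_num current_dict → Spec_enrich_dict string_num current_dict (enrich_dict string_num current_dict)

-- ===== LEMMAS AND PROOFS =====

-- the recursion and the search coincide step for step: A on the m-prefix equals
-- 'search up to fuel m, then do the single update'
theorem enrichRec_eq_find (L : List Char) (d : PySem.Dict String Int) :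
    ∀ m, m ≤ L.length →
      enrichDictRecA (L.take m) d =
        (match pvFindPrefixK L d m with
         | none => d
         | some k =>
             match PySem.Int.ofStr? (String.ofList [L.getD k ' ']) with
             | none => d
             | some e =>
                 PySem.Dict.insert d (String.ofList (L.take (k + 1)))
                   (PySem.Dict.getD d (String.ofList (L.take k)) 0 + e ^ (k + 1))) := by
  intro m
  induction m with
  | zero =>
      intro _
      rw [enrichDictRecA.eq_def]
      split
      · rfl
      · next c heq => simp [PySem.List.pyGet?_neg_one] at heq
  | succ n ih =>
      intro hle
      have hn : n < L.length := by omega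
      have htake : L.take (n + 1) = L.take n ++ [L[n]] := by
        rw [List.take_add_one]; simp [hn]
      have hlast : PySem.List.pyGet? (L.take (n + 1)) (-1) = some L[n] := by
        rw [htake, PySem.List.pyGet?_neg_one_append_singleton]
      have hlen : (L.take (n + 1)).length = n + 1 := by
        simp; omega
      have hinit : PySem.List.slice (L.take (n + 1)) (some 0)
          (some (((n + 1 : Nat) : Int) - 1)) = L.take n := by
        have h0 := pvSliceInit_eq_dropLast (L.take (n + 1))
        rw [hlen] at h0
        rw [h0, htake, List.dropLast_concat]
      have hgetD : L.getD n ' ' = L[n] := by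
        simp [List.getD, hn]
      rw [enrichDictRecA.eq_def]
      split
      · next heq => rw [hlast] at heq; simp at heq
      · next c heq =>
          rw [hlast] at heq
          injection heq with hc
          subst hc
          simp only [hlen, hinit]
          by_cases hcont : PySem.Dict.contains d (String.ofList (L.take n)) = true
          · simp only [pvFindPrefixK, hcont, if_true, hgetD]
          · simp only [pvFindPrefixK, hcont, if_false, Bool.false_eq_true]
            exact ih (Nat.le_of_lt hn)

-- ===== VERDICT (by name: the statement is the Claim_ definition above) =====
theorem enrich_dict_spec : Claim_equal_enrich_dict := by
  intro s d _ _
  unfold Spec_enrich_dict enrich_dict enrich_dict_alt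
  have h := enrichRec_eq_find s.toList (PySem.Dict.mk d) s.toList.length le_rfl
  rw [List.take_length] at h
  rw [h]
  cases hf : pvFindPrefixK s.toList (PySem.Dict.mk d) s.toList.length with
  | none => rfl
  | some k =>
      simp only
      cases ho : PySem.Int.ofStr? (String.ofList [s.toList.getD k ' ']) with
      | none => rfl
      | some e => rfl
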